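-- pv_equiv track=rewrite | github.com/jonathan-pasco-arnone/t3_COMP1405 | T3-Resources/myqueue.py | multidequeue
-- ===== SOURCE A (Python) =====
-- def dequeue(queue):
--     """ Removes first value of list unless list is empty """
--     return_value = "None"
--     if len(queue) > 0:
--         return_value = queue[0]
--         del queue[0]
--     return return_value
--
-- def multidequeue(queue, number):
--     """ Removes as many variables from the queue as
--     possible up to the number provided """
--     removed_items = []
--     # Run until the number is completed
--     while number > 0:
--         removed_value = dequeue(queue)
--         if removed_value == "None":
--             break
--         removed_items.append(removed_value)
--         number -= 1
--     return removed_items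
-- ===== SOURCE B (Python) =====
-- def multidequeue(queue, number):
--     """ Removes as many variables from the queue as
--     possible up to the number provided """
--     if number <= 0:
--         return []
--     k = min(number, len(queue))
--     removed_items = queue[:k]
--     del queue[:k]
--     return removed_items
-- ===== Notes on version B (the rewrite author's own statement) =====
-- stated objective: faster
-- what changed: Replaces the one-at-a-time dequeue loop (each del queue[0] shifts the whole list) with a single slice copy of the first min(number, len) items and one slice deletion.
import Mathlib
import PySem

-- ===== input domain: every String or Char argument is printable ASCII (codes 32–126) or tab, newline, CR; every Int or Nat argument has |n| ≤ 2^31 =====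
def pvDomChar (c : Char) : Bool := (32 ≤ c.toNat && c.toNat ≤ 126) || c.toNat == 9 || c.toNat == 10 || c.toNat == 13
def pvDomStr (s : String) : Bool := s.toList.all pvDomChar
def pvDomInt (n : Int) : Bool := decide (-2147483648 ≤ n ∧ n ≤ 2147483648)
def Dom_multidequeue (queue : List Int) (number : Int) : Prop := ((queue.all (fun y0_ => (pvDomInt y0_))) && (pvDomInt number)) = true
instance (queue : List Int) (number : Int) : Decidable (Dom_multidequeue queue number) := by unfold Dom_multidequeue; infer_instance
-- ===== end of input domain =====

-- B replaces A's one-at-a-time dequeue loop with a single slice of the first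
-- min(number, len) items (faster). Both Pythons mutate `queue` identically;
-- the equivalence proved here is about the RETURN value only.

-- ===== PORT A =====
-- dequeue(queue): returns none for the "None" sentinel (empty queue), some of the
-- first element otherwise; the caller's `del queue[0]` mutation is threaded as the
-- remaining queue.
def dequeuePy (queue : List Int) : Option Int × List Int :=
  match queue with
  | [] => (none, [])
  | x :: rest => (some x, rest)

-- the while loop: state (queue, removed_items, number), one iteration per recursive call
def multidequeueGo (queue : List Int) (number : Int) (removed : List Int) : List Int :=
  if number > 0 then
    match dequeuePy queue with
    | (none, _) => removed
    | (some x, rest) => multidequeueGo rest (number - 1) (removed ++ [x])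
  else removed
termination_by number.toNat
decreasing_by omega

def multidequeue (queue : List Int) (number : Int) : List Int :=
  multidequeueGo queue number []

-- ===== PORT B =====
def multidequeue_alt (queue : List Int) (number : Int) : List Int :=
  if number ≤ 0 then []
  else
    let k := min number (queue.length : Int)
    List.take k.toNat queue

-- ===== PRECONDITION & SPEC =====
def Spec_multidequeue (queue : List Int) (number : Int) (out : List Int) : Prop := out = multidequeue_alt queue number
instance (queue : List Int) (number : Int) (out : List Int) : Decidable (Spec_multidequeue queue number out) := by unfold Spec_multidequeue; infer_instance

-- ===== CLAIM (what is proved, stated in full; the proofs are below) =====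
def Claim_equal_multidequeue : Prop := ∀ (queue : List Int) (number : Int), Dom_multidequeue queue number → Spec_multidequeue queue number (multidequeue queue number)

-- ===== LEMMAS AND PROOFS =====
lemma multidequeueGo_eq_take (queue : List Int) :
    ∀ (number : Int) (removed : List Int),
      multidequeueGo queue number removed = removed ++ List.take number.toNat queue := by
  induction queue with
  | nil =>
    intro n removed
    unfold multidequeueGo
    split <;> simp [dequeuePy]
  | cons x rest ih =>
    intro n removed
    unfold multidequeueGo
    split
    · next h =>
      simp only [dequeuePy]
      rw [ih]
      have hn : n.toNat = (n - 1).toNat + 1 := by omega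
      rw [hn]
      simp
    · next h =>
      have : n.toNat = 0 := by omega
      simp [this]

lemma alt_eq_take (queue : List Int) (number : Int) :
    multidequeue_alt queue number = List.take number.toNat queue := by
  unfold multidequeue_alt
  split
  · next h =>
    have : number.toNat = 0 := by omega
    simp [this]
  · next h =>
    have hm : (min number (queue.length : Int)).toNat = min number.toNat queue.length := by
      omega
    simp only [hm]
    rw [← List.take_take, List.take_length]

-- ===== VERDICT (by name: the statement is the Claim_ definition above) =====
theorem multidequeue_spec : Claim_equal_multidequeue := by
  intro queue number _
  unfold Spec_multidequeue multidequeue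
  rw [multidequeueGo_eq_take, alt_eq_take]
  simp
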